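-- pv_equiv track=rewrite | github.com/kabomekgwe/gospel-keys | backend/app/services/advanced_generator_mixins.py | _has_circle_of_fifths
-- ===== SOURCE A (Python) =====
-- from typing import List, Dict, Any, Optional, AsyncGenerator, Tuple
--
-- def _has_circle_of_fifths(progression: List[str]) -> bool:
--     """Check for circle of fifths movement."""
--     # Simplified check
--     circle = ["C", "G", "D", "A", "E", "B", "F#", "Db", "Ab", "Eb", "Bb", "F"]
--     roots = [chord[0] for chord in progression]
--
--     for i in range(len(roots) - 1):
--         if roots[i] in circle and roots[i+1] in circle:
--             idx1, idx2 = circle.index(roots[i]), circle.index(roots[i+1])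
--             if (idx2 - idx1) % len(circle) == 1:
--                 return True
--     return False
-- ===== SOURCE B (Python) =====
-- def _has_circle_of_fifths(progression):
--     """Check for circle of fifths movement."""
--     # Roots are single characters (chord[0]), so the multi-character circle
--     # entries (F#, Db, Ab, Eb, Bb) can never match a root; the only possible
--     # circle-of-fifths steps between roots are the six digrams below
--     # (successor pairs of the single-letter circle members, incl. the wrap F->C).
--     s = "".join(chord[0] for chord in progression)
--     return any(p in s for p in ("CG", "GD", "DA", "AE", "EB", "FC"))
-- ===== Notes on version B (the rewrite author's own statement) =====
-- stated objective: faster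
-- what changed: B reduces the problem to string pattern matching: it joins the first characters of all chords into one string and asks whether any of the six possible root digrams (CG, GD, DA, AE, EB, FC - the successor pairs of the single-letter circle members, multi-letter entries being unreachable from a one-character root) occurs as a substring, replacing A's index loop with in-circle guards, two list.index scans per pair and modular index arithmetic by C-level substring searches.
import Mathlib
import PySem

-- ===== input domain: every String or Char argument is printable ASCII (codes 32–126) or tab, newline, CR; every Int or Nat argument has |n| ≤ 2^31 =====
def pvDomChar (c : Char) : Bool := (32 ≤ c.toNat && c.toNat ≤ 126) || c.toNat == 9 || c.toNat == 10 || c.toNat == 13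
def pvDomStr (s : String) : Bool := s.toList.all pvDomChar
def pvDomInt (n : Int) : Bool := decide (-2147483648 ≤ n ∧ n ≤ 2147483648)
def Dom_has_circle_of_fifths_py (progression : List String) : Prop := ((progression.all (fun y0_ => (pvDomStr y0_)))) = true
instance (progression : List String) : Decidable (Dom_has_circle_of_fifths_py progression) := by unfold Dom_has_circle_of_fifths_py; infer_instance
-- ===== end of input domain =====

-- B recasts the check as string pattern matching: join the chord roots into one string and test
-- it for the six possible circle-step digrams (objective: faster in a timing run's measure).


-- ===== PORT A =====
-- chord[0] for a nonempty chord string (Pre_ excludes ""): the one-char string of its first char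
def pvFirst (s : String) : String := String.ofList (s.toList.take 1)

def pvCircle : List String := ["C", "G", "D", "A", "E", "B", "F#", "Db", "Ab", "Eb", "Bb", "F"]

-- A's for-i loop over the index list range(len(roots)-1); those indices are in range, so pyGetD is exact
def pvALoop (roots : List String) : List Int → Bool
  | [] => false
  | i :: is =>
      let r1 := PySem.List.pyGetD roots i ""
      let r2 := PySem.List.pyGetD roots (i + 1) ""
      if r1 ∈ pvCircle ∧ r2 ∈ pvCircle then
        match PySem.List.index? pvCircle r1, PySem.List.index? pvCircle r2 with
        | some idx1, some idx2 =>
            if PySem.Int.mod ((idx2 : Int) - (idx1 : Int)) 12 = 1 then true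
            else pvALoop roots is
        | _, _ => pvALoop roots is
      else pvALoop roots is

def has_circle_of_fifths_py (progression : List String) : Bool :=
  let roots := progression.map pvFirst
  pvALoop roots (PySem.List.pyRange 0 ((roots.length : Int) - 1) 1)

-- ===== PORT B =====
-- the six patterns ("CG", "GD", "DA", "AE", "EB", "FC"), as char lists
def pvPatterns : List (List Char) := [['C','G'], ['G','D'], ['D','A'], ['A','E'], ['E','B'], ['F','C']]

-- s = "".join(chord[0] for chord in progression); chord[0] via PySem.Str.pyGet? (exact on Pre_,
-- where every chord is nonempty, so each pyGet? is `some`)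
def has_circle_of_fifths_py_alt (progression : List String) : Bool :=
  let s : List Char := progression.filterMap (fun chord => PySem.Str.pyGet? chord 0)
  pvPatterns.any (fun p => PySem.Chars.isIn p s)

-- ===== PRECONDITION & SPEC =====
-- Pre_ excludes progressions containing an empty chord string: there chord[0] raises IndexError in A (and in B too).
def Pre_has_circle_of_fifths_py (progression : List String) : Prop :=
  ∀ s ∈ progression, s ≠ ""
instance (progression : List String) : Decidable (Pre_has_circle_of_fifths_py progression) := by
  unfold Pre_has_circle_of_fifths_py; infer_instance

def pvWitness_has_circle_of_fifths_py : List String := ["C", "G7", "Dm"]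

def Spec_has_circle_of_fifths_py (progression : List String) (out : Bool) : Prop := out = has_circle_of_fifths_py_alt progression
instance (progression : List String) (out : Bool) : Decidable (Spec_has_circle_of_fifths_py progression out) := by unfold Spec_has_circle_of_fifths_py; infer_instance

-- ===== CLAIM (what is proved, stated in full; the proofs are below) =====
def Claim_equal_has_circle_of_fifths_py : Prop := ∀ (progression : List String), Dom_has_circle_of_fifths_py progression → Pre_has_circle_of_fifths_py progression → Spec_has_circle_of_fifths_py progression (has_circle_of_fifths_py progression)

-- ===== LEMMAS AND PROOFS =====

-- A's per-pair test, as a function of the two adjacent roots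
def pvStep (a b : String) : Bool :=
  if a ∈ pvCircle ∧ b ∈ pvCircle then
    match PySem.List.index? pvCircle a, PySem.List.index? pvCircle b with
    | some idx1, some idx2 => decide (PySem.Int.mod ((idx2 : Int) - (idx1 : Int)) 12 = 1)
    | _, _ => false
  else false

-- the six digrams as char pairs
def pvPairs : List (Char × Char) := [('C','G'), ('G','D'), ('D','A'), ('A','E'), ('E','B'), ('F','C')]

lemma pyGetD_cons_pos (x : String) (xs : List String) (i : Int) (h : 1 ≤ i) :
    PySem.List.pyGetD (x :: xs) i "" = PySem.List.pyGetD xs (i - 1) "" := by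
  have h0 : (0:Int) ≤ i := by omega
  have h1 : (0:Int) ≤ i - 1 := by omega
  rw [PySem.List.pyGetD_of_nonneg _ _ h0, PySem.List.pyGetD_of_nonneg _ _ h1]
  have hn : i.toNat = (i-1).toNat + 1 := by omega
  rw [hn, List.getD_cons_succ]

-- one iteration of A's loop is pvStep on the two fetched roots
lemma pvALoop_cons (roots : List String) (i : Int) (is : List Int) :
    pvALoop roots (i :: is)
      = (pvStep (PySem.List.pyGetD roots i "") (PySem.List.pyGetD roots (i + 1) "")
          || pvALoop roots is) := by
  simp only [pvALoop, pvStep]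
  split_ifs with hm
  · cases PySem.List.index? pvCircle (PySem.List.pyGetD roots i "") <;>
    cases PySem.List.index? pvCircle (PySem.List.pyGetD roots (i + 1) "") <;>
      simp
  · simp

-- shifting the roots list against an index list of positive indices
lemma pvALoop_shift (x : String) (roots : List String) (is : List Int)
    (h : ∀ i ∈ is, 1 ≤ i) :
    pvALoop (x :: roots) is = pvALoop roots (is.map (· - 1)) := by
  induction is with
  | nil => rfl
  | cons i is ih =>
    have hi : 1 ≤ i := h i (by simp)
    have h' : ∀ j ∈ is, 1 ≤ j := fun j hj => h j (by simp [hj])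
    rw [List.map_cons, pvALoop_cons, pvALoop_cons,
        pyGetD_cons_pos _ _ _ hi, pyGetD_cons_pos _ _ _ (by omega : (1:Int) ≤ i + 1)]
    have e1 : i + 1 - 1 = (i - 1) + 1 := by ring
    rw [e1, ih h']

lemma pyRange_map_sub_one (m : Int) :
    (PySem.List.pyRange 1 m 1).map (· - 1) = PySem.List.pyRange 0 (m - 1) 1 := by
  rw [PySem.List.pyRange_one, PySem.List.pyRange_one, List.map_map]
  have : m - 1 - 0 = m - 1 := by ring
  rw [this]
  exact List.map_congr_left (fun k _ => by simp only [Function.comp_apply]; omega)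

-- A's whole loop is "some adjacent root pair passes pvStep"
lemma pvALoop_eq (roots : List String) :
    pvALoop roots (PySem.List.pyRange 0 ((roots.length : Int) - 1) 1)
      = (roots.zip (roots.drop 1)).any (fun p => pvStep p.1 p.2) := by
  induction roots with
  | nil => simp [pvALoop, PySem.List.pyRange_one_eq_nil (by norm_num : (-1:Int) ≤ 0)]
  | cons a tl ih =>
    cases tl with
    | nil => simp [pvALoop, PySem.List.pyRange_one_eq_nil (le_refl (0:Int))]
    | cons b rest =>
      have hlen : ((((a :: b :: rest).length : Int)) - 1) = (rest.length : Int) + 1 := by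
        simp
      rw [hlen, PySem.List.pyRange_one_cons (by positivity), pvALoop_cons]
      simp only [zero_add]
      have hpos : ∀ i ∈ PySem.List.pyRange 1 ((rest.length : Int) + 1) 1, 1 ≤ i := by
        intro i hi
        exact ((PySem.List.mem_pyRange_one).1 hi).1
      rw [pvALoop_shift _ _ _ hpos, pyRange_map_sub_one]
      have hlen2 : ((rest.length : Int) + 1) - 1 = ((b :: rest).length : Int) - 1 := by
        simp
      rw [hlen2, ih]
      have hg1 : PySem.List.pyGetD (a :: b :: rest) 1 "" = b := by
        rw [PySem.List.pyGetD_of_nonneg _ _ (by norm_num)]; rfl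
      rw [hg1]
      simp

-- one-char strings: circle membership is membership in the single-letter entries
lemma mem_circle_iff (a : Char) :
    String.ofList [a] ∈ pvCircle ↔ a ∈ (['C','G','D','A','E','B','F'] : List Char) := by
  simp [pvCircle, String.ext_iff]

-- A's pair test on two one-char roots is exactly "the digram is one of the six"
lemma pvStep_char (a b : Char) :
    pvStep (String.ofList [a]) (String.ofList [b]) = decide ((a, b) ∈ pvPairs) := by
  by_cases ha : a ∈ (['C','G','D','A','E','B','F'] : List Char)
  · by_cases hb : b ∈ (['C','G','D','A','E','B','F'] : List Char)
    · fin_cases ha <;> fin_cases hb <;> decide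
    · have h1 : pvStep (String.ofList [a]) (String.ofList [b]) = false := by
        simp [pvStep, (mem_circle_iff b).not.2 hb]
      have h2 : (a, b) ∉ pvPairs := by
        intro hm
        apply hb
        simp only [pvPairs, List.mem_cons, List.not_mem_nil, or_false, Prod.mk.injEq] at hm
        rcases hm with ⟨_,h⟩|⟨_,h⟩|⟨_,h⟩|⟨_,h⟩|⟨_,h⟩|⟨_,h⟩ <;> subst h <;> decide
      simp [h1, h2]
  · have h1 : pvStep (String.ofList [a]) (String.ofList [b]) = false := by
      simp [pvStep, (mem_circle_iff a).not.2 ha]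
    have h2 : (a, b) ∉ pvPairs := by
      intro hm
      apply ha
      simp only [pvPairs, List.mem_cons, List.not_mem_nil, or_false, Prod.mk.injEq] at hm
      rcases hm with ⟨h,_⟩|⟨h,_⟩|⟨h,_⟩|⟨h,_⟩|⟨h,_⟩|⟨h,_⟩ <;> subst h <;> decide
    simp [h1, h2]

-- a two-char infix is exactly an adjacent pair
lemma infix_two_iff (x y : Char) (cs : List Char) :
    [x, y] <:+: cs ↔ (x, y) ∈ cs.zip (cs.drop 1) := by
  induction cs with
  | nil => simp [List.infix_nil]
  | cons a t ih =>
    rw [List.infix_cons_iff]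
    cases t with
    | nil =>
      constructor
      · rintro (⟨r, hr⟩ | h)
        · simp at hr
        · rw [List.infix_nil] at h; simp at h
      · intro h; simp at h
    | cons b t' =>
      have hpre : [x, y] <+: a :: b :: t' ↔ (x = a ∧ y = b) := by
        constructor
        · rintro ⟨r, hr⟩
          simp only [List.cons_append, List.cons.injEq] at hr
          exact ⟨hr.1, hr.2.1⟩
        · rintro ⟨hx, hy⟩; subst hx; subst hy; exact ⟨t', rfl⟩
      rw [hpre, ih]
      simp [List.zip_cons_cons, Prod.ext_iff]

-- under Pre_, A's roots list is the one-char strings of B's joined characters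
lemma roots_eq (progression : List String) (hpre : ∀ s ∈ progression, s ≠ "") :
    progression.map pvFirst
      = (progression.filterMap (fun chord => PySem.Str.pyGet? chord 0)).map
          (fun c => String.ofList [c]) := by
  induction progression with
  | nil => rfl
  | cons s tl ih =>
    have hs : s ≠ "" := hpre s (by simp)
    have hne : s.toList ≠ [] := fun h => hs (by
      have := congrArg String.ofList h
      simpa using this)
    obtain ⟨c, cs, hcs⟩ := List.exists_cons_of_ne_nil hne
    have hget : PySem.Str.pyGet? s 0 = some c := by
      have h0 : ((0:Nat):Int) = (0:Int) := rfl
      rw [← h0, PySem.Str.pyGet?_natCast, hcs]; rfl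
    have hfirst : pvFirst s = String.ofList [c] := by
      unfold pvFirst; rw [hcs]; rfl
    simp only [List.map_cons, List.filterMap_cons, hget, hfirst, List.map_cons]
    exact congrArg _ (ih (fun t ht => hpre t (by simp [ht])))

-- B equals "some adjacent pair of the joined chars is one of the six digrams"
lemma alt_eq (cs : List Char) :
    pvPatterns.any (fun p => PySem.Chars.isIn p cs)
      = (cs.zip (cs.drop 1)).any (fun q => decide (q ∈ pvPairs)) := by
  apply Bool.eq_iff_iff.mpr
  simp only [List.any_eq_true, decide_eq_true_eq]
  constructor
  · rintro ⟨p, hp, hin⟩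
    have hinf := (PySem.Chars.isIn_iff_infix _ _).1 hin
    simp only [pvPatterns, List.mem_cons, List.not_mem_nil, or_false] at hp
    rcases hp with h|h|h|h|h|h <;> subst h <;>
      exact ⟨_, (infix_two_iff _ _ _).1 hinf, by decide⟩
  · rintro ⟨⟨x, y⟩, hz, hm⟩
    simp only [pvPairs, List.mem_cons, List.not_mem_nil, or_false, Prod.mk.injEq] at hm
    rcases hm with ⟨h1,h2⟩|⟨h1,h2⟩|⟨h1,h2⟩|⟨h1,h2⟩|⟨h1,h2⟩|⟨h1,h2⟩ <;> subst h1 <;> subst h2 <;>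
      exact ⟨_, by simp [pvPatterns], (PySem.Chars.isIn_iff_infix _ _).2 ((infix_two_iff _ _ _).2 hz)⟩

-- ===== VERDICT (by name: the statement is the Claim_ definition above) =====
theorem has_circle_of_fifths_py_spec : Claim_equal_has_circle_of_fifths_py := by
  intro prog _ hpre
  unfold Spec_has_circle_of_fifths_py has_circle_of_fifths_py has_circle_of_fifths_py_alt
  rw [pvALoop_eq, roots_eq prog hpre, alt_eq]
  set cs := prog.filterMap (fun chord => PySem.Str.pyGet? chord 0) with hcs
  rw [← List.map_drop, List.zip_map, List.any_map]
  congr 1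
  funext q
  obtain ⟨x, y⟩ := q
  exact pvStep_char x y
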